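-- pv_equiv track=rewrite | github.com/grammarware/modernity-python | pyternity/modernity_signature.py | generate_signature
-- ===== SOURCE A (Python) =====
-- from collections import defaultdict
--
-- def generate_signature(minimum_versions: dict[str, list[tuple[int, int] | None]], weights: dict[str, int]):
--     signature: ModernitySignature = defaultdict(int)
--
--     for file, versions in minimum_versions.items():
--         for version in versions:
--             if version:
--                 major, minor = version
--                 for i in range(minor + 1):
--                     signature[(major, i)] += weights[file]
--
--     return {v: signature[v] for v in sorted(signature)}
-- ===== SOURCE B (Python) =====
-- def generate_signature(minimum_versions: dict[str, list[tuple[int, int] | None]], weights: dict[str, int]):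
--     # Flat list of contributions: one (major, minor, weight) per truthy version
--     # (versions with a negative minor span no signature keys and are skipped).
--     triples = [(major, minor, weights[file])
--                for file, versions in minimum_versions.items()
--                for version in versions
--                if version is not None and version[1] >= 0
--                for major, minor in [version]]
--     keys = sorted({(major, i) for major, minor, _ in triples for i in range(minor + 1)})
--     return {(major, i): sum(w for M, m, w in triples if M == major and m >= i)
--             for major, i in keys}
-- ===== Notes on version B (the rewrite author's own statement) =====
-- stated objective: alternative
-- what changed: A accumulates a defaultdict by walking every prefix 0..minor of every version and incrementing per key; B builds a flat (major, minor, weight) contribution list once, derives the key set from it, and computes each key's value as a single filtered sum (m >= i over contributions), with no incremental dict at all.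
import Mathlib
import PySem

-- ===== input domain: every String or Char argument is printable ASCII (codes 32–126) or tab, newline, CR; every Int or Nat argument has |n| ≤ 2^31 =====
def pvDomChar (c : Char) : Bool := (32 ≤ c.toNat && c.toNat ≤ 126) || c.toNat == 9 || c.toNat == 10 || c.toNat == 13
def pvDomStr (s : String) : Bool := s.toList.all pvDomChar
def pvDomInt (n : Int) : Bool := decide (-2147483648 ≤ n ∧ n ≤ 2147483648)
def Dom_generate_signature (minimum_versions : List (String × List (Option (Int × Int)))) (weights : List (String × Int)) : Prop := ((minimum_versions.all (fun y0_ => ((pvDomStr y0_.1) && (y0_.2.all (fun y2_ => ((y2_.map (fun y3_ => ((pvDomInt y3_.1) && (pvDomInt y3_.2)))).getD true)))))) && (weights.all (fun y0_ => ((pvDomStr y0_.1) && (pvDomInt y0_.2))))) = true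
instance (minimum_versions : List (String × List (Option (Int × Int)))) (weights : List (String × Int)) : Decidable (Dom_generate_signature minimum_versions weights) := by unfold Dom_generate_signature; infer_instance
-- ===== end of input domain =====

-- B replaces A's incremental defaultdict (prefix-fill inner loop per version) by a flat contribution
-- list with a direct per-key filtered sum — an alternative decomposition, not claimed faster.

-- ===== PORT A =====
-- weights[file]; exact under Pre_ (the file is present), Python raises KeyError when it is absent
def pvA_wget (weights : List (String × Int)) (file : String) : Int :=
  (PySem.Dict.mk weights).getD file 0

def generate_signature (minimum_versions : List (String × List (Option (Int × Int)))) (weights : List (String × Int)) : List (Int × Int × Int) :=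
  let sig : PySem.Dict (Int × Int) Int :=
    minimum_versions.foldl (fun d p =>
      p.2.foldl (fun d version =>
        match version with
        | none => d
        | some (major, minor) =>
          (PySem.List.pyRange 0 (minor + 1) 1).foldl
            (fun d i => d.modify (major, i) 0 (· + pvA_wget weights p.1)) d) d)
      PySem.Dict.empty
  (PySem.List.sorted sig.keys (fun k => (toLex k : Lex (Int × Int)))).map
    (fun v => (v.1, v.2, sig.getD v 0))

-- ===== PORT B =====
def pvB_wget (weights : List (String × Int)) (file : String) : Int :=
  (PySem.Dict.mk weights).getD file 0

def generate_signature_alt (minimum_versions : List (String × List (Option (Int × Int)))) (weights : List (String × Int)) : List (Int × Int × Int) :=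
  let triples : List (Int × Int × Int) :=
    minimum_versions.flatMap (fun p =>
      p.2.filterMap (fun version =>
        match version with
        | some (major, minor) =>
          if 0 ≤ minor then some (major, minor, pvB_wget weights p.1) else none
        | none => none))
  let keys : List (Int × Int) :=
    PySem.List.sorted
      (PySem.Set.ofList (triples.flatMap (fun t =>
        (PySem.List.pyRange 0 (t.2.1 + 1) 1).map (fun i => (t.1, i)))))
      (fun k => (toLex k : Lex (Int × Int)))
  keys.map (fun k =>
    (k.1, k.2, ((triples.filter (fun t => t.1 == k.1 && decide (k.2 ≤ t.2.1))).map (fun t => t.2.2)).sum))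

-- ===== PRECONDITION & SPEC =====
-- true for a version entry that makes A (and B) look the file up in weights
def pvNeedsWeight (v : Option (Int × Int)) : Bool :=
  match v with
  | some q => decide (0 ≤ q.2)
  | none => false

-- Pre_ excludes exactly the inputs where Python A raises KeyError: some file whose version list
-- contains a truthy version with nonnegative minor is missing from weights.
def Pre_generate_signature (minimum_versions : List (String × List (Option (Int × Int)))) (weights : List (String × Int)) : Prop :=
  ∀ p ∈ minimum_versions, (∃ v ∈ p.2, pvNeedsWeight v = true) → p.1 ∈ weights.map Prod.fst

instance (minimum_versions : List (String × List (Option (Int × Int)))) (weights : List (String × Int)) : Decidable (Pre_generate_signature minimum_versions weights) := by unfold Pre_generate_signature; infer_instance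

def pvWitness_generate_signature : (List (String × List (Option (Int × Int)))) × (List (String × Int)) :=
  ([("a", [some (1, 2), none]), ("b", [some (2, 0)])], [("a", 3), ("b", -1)])

def Spec_generate_signature (minimum_versions : List (String × List (Option (Int × Int)))) (weights : List (String × Int)) (out : List (Int × Int × Int)) : Prop := out = generate_signature_alt minimum_versions weights
instance (minimum_versions : List (String × List (Option (Int × Int)))) (weights : List (String × Int)) (out : List (Int × Int × Int)) : Decidable (Spec_generate_signature minimum_versions weights out) := by unfold Spec_generate_signature; infer_instance

-- ===== CLAIM (what is proved, stated in full; the proofs are below) =====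
def Claim_equal_generate_signature : Prop := ∀ (minimum_versions : List (String × List (Option (Int × Int)))) (weights : List (String × Int)), Dom_generate_signature minimum_versions weights → Pre_generate_signature minimum_versions weights → Spec_generate_signature minimum_versions weights (generate_signature minimum_versions weights)

-- ===== LEMMAS AND PROOFS =====

-- A's dict-update stream, flattened: one ((major, i), weight) move per defaultdict increment
def pvMoves (minimum_versions : List (String × List (Option (Int × Int)))) (weights : List (String × Int)) : List ((Int × Int) × Int) :=
  minimum_versions.flatMap (fun p =>
    p.2.flatMap (fun version =>
      match version with
      | some (major, minor) =>
        (PySem.List.pyRange 0 (minor + 1) 1).map (fun i => ((major, i), pvA_wget weights p.1))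
      | none => []))

-- B's contribution list, named for the proofs
def pvTriples (minimum_versions : List (String × List (Option (Int × Int)))) (weights : List (String × Int)) : List (Int × Int × Int) :=
  minimum_versions.flatMap (fun p =>
    p.2.filterMap (fun version =>
      match version with
      | some (major, minor) =>
        if 0 ≤ minor then some (major, minor, pvB_wget weights p.1) else none
      | none => none))

lemma pvSigA_eq (mv : List (String × List (Option (Int × Int)))) (w : List (String × Int)) :
    mv.foldl (fun d p =>
      p.2.foldl (fun d version =>
        match version with
        | none => d
        | some (major, minor) =>
          (PySem.List.pyRange 0 (minor + 1) 1).foldl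
            (fun d i => d.modify (major, i) 0 (· + pvA_wget w p.1)) d) d)
      PySem.Dict.empty
    = (pvMoves mv w).foldl (fun d q => d.modify q.1 0 (· + q.2)) PySem.Dict.empty := by
  unfold pvMoves
  rw [List.foldl_flatMap]
  apply PySem.List.foldl_congr_mem
  intro acc p _
  rw [List.foldl_flatMap]
  apply PySem.List.foldl_congr_mem
  intro acc2 v _
  cases v with
  | none => rfl
  | some q =>
    obtain ⟨M, m⟩ := q
    rw [List.foldl_map]

lemma pvGetD_fold_sum (L : List ((Int × Int) × Int)) (d : PySem.Dict (Int × Int) Int) (k : Int × Int) :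
    (L.foldl (fun d q => d.modify q.1 0 (· + q.2)) d).getD k 0
      = d.getD k 0 + ((L.filter (fun q => q.1 == k)).map Prod.snd).sum := by
  induction L generalizing d with
  | nil => simp
  | cons q L ih =>
    simp only [List.foldl_cons, ih, List.filter_cons]
    by_cases h : q.1 = k
    · subst h
      simp [PySem.Dict.getD_modify_self]
      ring
    · rw [PySem.Dict.getD_modify]
      simp [h]
      intro hc; exact absurd hc.symm h

lemma pvRange_neg (m : Int) (h : m < 0) : PySem.List.pyRange 0 (m+1) 1 = [] := by
  simp [PySem.List.pyRange]; omega

lemma pvMoves_eq (mv : List (String × List (Option (Int × Int)))) (w : List (String × Int)) :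
    pvMoves mv w = (pvTriples mv w).flatMap (fun t =>
      (PySem.List.pyRange 0 (t.2.1 + 1) 1).map (fun i => ((t.1, i), t.2.2))) := by
  unfold pvMoves pvTriples
  rw [List.flatMap_assoc]
  apply List.flatMap_congr
  intro p _
  induction p.2 with
  | nil => simp
  | cons v vs ih =>
    cases v with
    | none => simpa using ih
    | some q =>
      obtain ⟨M, m⟩ := q
      by_cases hm : 0 ≤ m
      · simp only [List.flatMap_cons, List.filterMap_cons, if_pos hm]
        simp only [ih]
        rfl
      · simp only [List.flatMap_cons, List.filterMap_cons, if_neg hm]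
        rw [pvRange_neg m (by omega)]
        simpa using ih

lemma pvCount_pyRange (b c : Int) (hc : 0 ≤ c) :
    (PySem.List.pyRange 0 b 1).count c = if c < b then 1 else 0 := by
  by_cases hb : 0 ≤ b
  · obtain ⟨n, rfl⟩ := Int.eq_ofNat_of_zero_le hb
    obtain ⟨j, rfl⟩ := Int.eq_ofNat_of_zero_le hc
    rw [PySem.List.pyRange_zero_natCast]
    rw [List.count_map_of_injective _ _ (fun a b h => by exact_mod_cast h)]
    rw [List.count_range]
    split <;> split <;> first | rfl | omega
  · have h0 : PySem.List.pyRange 0 b 1 = [] := by simp [PySem.List.pyRange]; omega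
    rw [h0]; simp; omega

lemma pvSum_filter {α : Type} (T : List α) (c : α → Bool) (f : α → Int) :
    ((T.filter c).map f).sum = (T.map (fun t => if c t = true then f t else 0)).sum := by
  induction T with
  | nil => rfl
  | cons t T ih =>
    simp only [List.filter_cons, List.map_cons, List.sum_cons]
    by_cases h : c t = true <;> simp [h, ih]

lemma pvSum_one (M m wt : Int) (k : Int × Int) (hk : 0 ≤ k.2) :
    ((((PySem.List.pyRange 0 (m + 1) 1).map (fun i => ((M, i), wt))).filter
        (fun q => q.1 == k)).map Prod.snd).sum
      = if (M == k.1 && decide (k.2 ≤ m)) = true then wt else 0 := by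
  obtain ⟨k1, k2⟩ := k
  simp only at hk
  rw [List.filter_map]
  by_cases hM : M = k1
  · subst hM
    have hpred : ((fun q => q.1 == (M, k2)) ∘ (fun i => ((M, i), wt))) = (fun i => i == k2) := by
      funext i; simp
    rw [hpred, List.filter_beq]
    simp only [List.map_replicate, List.sum_replicate]
    rw [pvCount_pyRange _ _ hk]
    simp only [beq_self_eq_true, Bool.true_and]
    split <;> split <;> simp_all <;> omega
  · have hpred : ((fun q => q.1 == (k1, k2)) ∘ (fun i => ((M, i), wt))) = (fun _ => false) := by
      funext i; simp [hM]
    rw [hpred]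
    simp [hM]

-- ===== VERDICT (by name: the statement is the Claim_ definition above) =====
theorem generate_signature_spec : Claim_equal_generate_signature := by
  intro mv w _ _
  unfold Spec_generate_signature generate_signature generate_signature_alt
  simp only []
  rw [pvSigA_eq]
  have hkeys : ((pvMoves mv w).foldl (fun d q => d.modify q.1 0 (· + q.2)) PySem.Dict.empty).keys
      = PySem.Set.ofList ((pvTriples mv w).flatMap (fun t =>
          (PySem.List.pyRange 0 (t.2.1 + 1) 1).map (fun i => (t.1, i)))) := by
    rw [PySem.Dict.keys_foldl_modify_key (pvMoves mv w) Prod.fst 0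
          (fun _ q => (· + q.2)) PySem.Dict.empty]
    show PySem.Set.update ([] : List (Int × Int)) _ = _
    rw [pvMoves_eq]
    simp only [List.map_flatMap, List.map_map]
    rfl
  rw [hkeys]
  apply List.map_congr_left
  intro k hk
  have hkmem : k ∈ (pvTriples mv w).flatMap (fun t =>
      (PySem.List.pyRange 0 (t.2.1 + 1) 1).map (fun i => (t.1, i))) := by
    have := (PySem.List.sorted_perm _ (fun k : Int × Int => (toLex k : Lex (Int × Int))) false).mem_iff.mp hk
    exact (PySem.Set.mem_ofList _ _).mp this
  have hk2 : 0 ≤ k.2 := by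
    rcases List.mem_flatMap.mp hkmem with ⟨t, _, hmem⟩
    rcases List.mem_map.mp hmem with ⟨i, hi, hik⟩
    have := PySem.List.mem_pyRange_one.mp hi
    subst hik
    exact this.1
  have hval : ((pvMoves mv w).foldl (fun d q => d.modify q.1 0 (· + q.2)) PySem.Dict.empty).getD k 0
      = (((pvTriples mv w).filter (fun t => t.1 == k.1 && decide (k.2 ≤ t.2.1))).map (fun t => t.2.2)).sum := by
    rw [pvGetD_fold_sum]
    show 0 + _ = _
    rw [pvMoves_eq, List.filter_flatMap, List.map_flatMap]
    rw [List.flatMap, List.sum_flatten, List.map_map]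
    rw [pvSum_filter]
    rw [zero_add]
    apply congrArg
    apply List.map_congr_left
    intro t _
    show ((((PySem.List.pyRange 0 (t.2.1 + 1) 1).map (fun i => ((t.1, i), t.2.2))).filter
        (fun q => q.1 == k)).map Prod.snd).sum = _
    rw [pvSum_one t.1 t.2.1 t.2.2 k hk2]
  rw [hval]
  rfl
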